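-- pv_equiv track=rewrite | github.com/AndrewVGustafson/wordle_solver | utils/purge.py | purge_correct
-- ===== SOURCE A (Python) =====
-- def purge_correct(blocks: dict, words: list) -> list:
--     purged_words = words
--     for letter, position in blocks:
--         purged_words = [
--             word for word in purged_words
--             if letter in word and letter in word[position]
--             ]
--     return purged_words
-- ===== SOURCE B (Python) =====
-- def purge_correct(blocks: dict, words: list) -> list:
--     def satisfies(word):
--         for letter, position in blocks:
--             if letter not in word or letter not in word[position]:
--                 return False
--         return True
--     return [word for word in words if satisfies(word)]
-- ===== Notes on version B (the rewrite author's own statement) =====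
-- stated objective: simpler
-- what changed: Transposes the nesting: instead of one filtering pass per block rebuilding an intermediate list each time, B tests each word once against all blocks via an early-exit helper loop and keeps the survivors in a single pass.
import Mathlib
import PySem

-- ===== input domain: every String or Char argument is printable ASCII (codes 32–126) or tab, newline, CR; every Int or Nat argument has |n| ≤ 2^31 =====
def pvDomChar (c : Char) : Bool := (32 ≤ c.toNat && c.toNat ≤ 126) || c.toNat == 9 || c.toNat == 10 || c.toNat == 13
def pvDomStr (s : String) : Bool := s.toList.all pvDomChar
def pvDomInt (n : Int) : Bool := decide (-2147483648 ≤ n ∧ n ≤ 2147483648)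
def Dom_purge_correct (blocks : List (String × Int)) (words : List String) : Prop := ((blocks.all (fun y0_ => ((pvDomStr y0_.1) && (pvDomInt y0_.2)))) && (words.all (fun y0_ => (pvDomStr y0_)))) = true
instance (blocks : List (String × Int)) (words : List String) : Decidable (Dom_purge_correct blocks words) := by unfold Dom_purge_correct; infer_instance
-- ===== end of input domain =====

-- B replaces A's per-block sequential re-filtering (one intermediate word list per block) by a
-- single pass over words, testing each word once against all blocks with an early-exit loop
-- (simpler decomposition, same cost).

-- ===== PORT A =====
-- for letter, position in blocks: purged_words = [word for word in purged_words if letter in word and letter in word[position]]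
-- (word[position] out of range is Python's IndexError: the none branch; excluded by Pre_purge_correct)
def purge_correct (blocks : List (String × Int)) (words : List String) : List String :=
  blocks.foldl
    (fun purged_words lp =>
      purged_words.filter (fun word =>
        PySem.Str.isIn lp.1 word &&
          (match PySem.Str.pyGet? word lp.2 with
           | some c => PySem.Chars.isIn lp.1.toList [c]
           | none => false)))
    words

-- ===== PORT B =====
-- B's inner helper 'satisfies': loop over blocks, early return False on the first failing block.
-- 'letter not in word[position]' on an out-of-range position is Python's IndexError (the none
-- branch); excluded by Pre_purge_correct.
def pvSatisfies (word : String) : List (String × Int) → Bool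
  | [] => true
  | (letter, position) :: rest =>
      if !(PySem.Str.isIn letter word) ||
         !(match PySem.Str.pyGet? word position with
           | some c => PySem.Chars.isIn letter.toList [c]
           | none => false) then
        false
      else
        pvSatisfies word rest

def purge_correct_alt (blocks : List (String × Int)) (words : List String) : List String :=
  match words with
  | [] => []
  | word :: rest =>
      if pvSatisfies word blocks then word :: purge_correct_alt blocks rest
      else purge_correct_alt blocks rest

-- ===== PRECONDITION & SPEC =====
-- helper for Pre_ only: the block (letter, position) keeps the word (letter occurs in the word
-- and in the 1-char string at that position); used to say which words survive the earlier blocks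
def pvBlockKeeps (lp : String × Int) (w : String) : Bool :=
  PySem.Str.isIn lp.1 w &&
    (match PySem.Str.pyGet? w lp.2 with
     | some c => PySem.Chars.isIn lp.1.toList [c]
     | none => false)

-- Pre_ excludes EXACTLY the inputs on which the Pythons raise IndexError: some word that survives
-- all earlier blocks contains block i's letter while block i's position is out of range for it.
-- (Both A and B raise there, in both nesting orders the same pairs (block, word) are indexed.)
def Pre_purge_correct (blocks : List (String × Int)) (words : List String) : Prop :=
  ∀ i : Nat, ∀ h : i < blocks.length, ∀ w ∈ words,
    (∀ j : Nat, ∀ hj : j < i, pvBlockKeeps (blocks[j]'(by omega)) w = true) →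
    PySem.Str.isIn (blocks[i]).1 w = true →
    -(w.toList.length : Int) ≤ (blocks[i]).2 ∧ (blocks[i]).2 < w.toList.length
instance (blocks : List (String × Int)) (words : List String) : Decidable (Pre_purge_correct blocks words) := by
  unfold Pre_purge_correct; infer_instance

def pvWitness_purge_correct : (List (String × Int)) × List String := ([("a", 0)], ["ab", "ba"])

def Spec_purge_correct (blocks : List (String × Int)) (words : List String) (out : List String) : Prop := out = purge_correct_alt blocks words
instance (blocks : List (String × Int)) (words : List String) (out : List String) : Decidable (Spec_purge_correct blocks words out) := by unfold Spec_purge_correct; infer_instance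

-- ===== CLAIM =====
def Claim_equal_purge_correct : Prop := ∀ (blocks : List (String × Int)) (words : List String), Dom_purge_correct blocks words → Pre_purge_correct blocks words → Spec_purge_correct blocks words (purge_correct blocks words)

-- ===== LEMMAS AND PROOFS =====
-- B's early-exit block loop computes the conjunction of all per-block checks
theorem pvSatisfies_eq_all (w : String) (bs : List (String × Int)) :
    pvSatisfies w bs = bs.all (fun lp => pvBlockKeeps lp w) := by
  induction bs with
  | nil => rfl
  | cons b bs ih =>
      obtain ⟨letter, position⟩ := b
      simp only [pvSatisfies, pvBlockKeeps, ih, List.all_cons]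
      cases PySem.Str.isIn letter w <;>
        cases (match PySem.Str.pyGet? w position with
               | some c => PySem.Chars.isIn letter.toList [c]
               | none => false) <;> simp

-- B's word recursion is a filter by pvSatisfies
theorem purge_correct_alt_eq_filter (bs : List (String × Int)) (ws : List String) :
    purge_correct_alt bs ws = ws.filter (fun w => pvSatisfies w bs) := by
  induction ws with
  | nil => rfl
  | cons w ws ih =>
      rw [purge_correct_alt, ih, List.filter_cons]

-- A's sequential per-block filtering equals one filter by the conjunction of all blocks
theorem pvFoldlFilter_eq_filterAll (bs : List (String × Int)) (ws : List String) :
    bs.foldl (fun pw lp => pw.filter (fun w => pvBlockKeeps lp w)) ws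
      = ws.filter (fun w => bs.all (fun lp => pvBlockKeeps lp w)) := by
  induction bs generalizing ws with
  | nil => simp
  | cons b bs ih =>
      simp [List.foldl_cons, ih, List.filter_filter, List.all_cons, Bool.and_comm]

-- ===== VERDICT =====
theorem purge_correct_spec : Claim_equal_purge_correct := by
  intro blocks words _ _
  unfold Spec_purge_correct
  have hA : purge_correct blocks words
      = blocks.foldl (fun pw lp => pw.filter (fun w => pvBlockKeeps lp w)) words := rfl
  rw [hA, pvFoldlFilter_eq_filterAll, purge_correct_alt_eq_filter]
  simp [pvSatisfies_eq_all]
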